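-- pv_equiv track=rewrite | github.com/vibhorgupta09/vera-bot | messaging/composer.py | _digest_item
-- ===== SOURCE A (Python) =====
-- def _digest_item(category, trigger, preferred_kinds=None):
--     category = category or {}
--     payload = trigger.get("payload", {})
--     wanted_ids = [
--         payload.get("top_item_id"),
--         payload.get("digest_item_id"),
--         payload.get("alert_id"),
--         payload.get("item_id"),
--     ]
--     digest = category.get("digest", [])
--     for wanted in [w for w in wanted_ids if w]:
--         for item in digest:
--             if item.get("id") == wanted:
--                 return item
--     if preferred_kinds:
--         for item in digest:
--             if item.get("kind") in preferred_kinds: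
--                 return item
--     return digest[0] if digest else {}
-- ===== SOURCE B (Python) =====
-- def _digest_item(category, trigger, preferred_kinds=None):
--     # Single pass over digest: keep the first item of minimal priority rank
--     # (rank = index of first matching wanted id; kind match ranks after all ids;
--     # any item ranks last, which yields digest[0] as the fallback).
--     category = category or {}
--     payload = trigger.get("payload", {})
--     wanted = [w for w in (payload.get(k) for k in
--               ("top_item_id", "digest_item_id", "alert_id", "item_id")) if w]
--     digest = category.get("digest", [])
--     kind_rank = len(wanted)
--     worst = kind_rank + 1
--     best_rank, best = worst + 1, {}
--     for item in digest:
--         iid = item.get("id")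
--         rank = next((j for j, w in enumerate(wanted) if iid == w), worst)
--         if rank == worst and preferred_kinds and item.get("kind") in preferred_kinds:
--             rank = kind_rank
--         if rank < best_rank:
--             best_rank, best = rank, item
--             if rank == 0:
--                 break
--     return best
-- ===== Notes on version B (the rewrite author's own statement) =====
-- stated objective: alternative
-- what changed: B is a single pass over digest with a min-rank accumulator (rank = index of the first matching wanted id, then a kind-match rank, then a last-place rank that makes digest[0] the fallback), replacing A's staged passes: one rescan of digest per wanted id, a kind pass, and a head fallback.
import Mathlib
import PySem

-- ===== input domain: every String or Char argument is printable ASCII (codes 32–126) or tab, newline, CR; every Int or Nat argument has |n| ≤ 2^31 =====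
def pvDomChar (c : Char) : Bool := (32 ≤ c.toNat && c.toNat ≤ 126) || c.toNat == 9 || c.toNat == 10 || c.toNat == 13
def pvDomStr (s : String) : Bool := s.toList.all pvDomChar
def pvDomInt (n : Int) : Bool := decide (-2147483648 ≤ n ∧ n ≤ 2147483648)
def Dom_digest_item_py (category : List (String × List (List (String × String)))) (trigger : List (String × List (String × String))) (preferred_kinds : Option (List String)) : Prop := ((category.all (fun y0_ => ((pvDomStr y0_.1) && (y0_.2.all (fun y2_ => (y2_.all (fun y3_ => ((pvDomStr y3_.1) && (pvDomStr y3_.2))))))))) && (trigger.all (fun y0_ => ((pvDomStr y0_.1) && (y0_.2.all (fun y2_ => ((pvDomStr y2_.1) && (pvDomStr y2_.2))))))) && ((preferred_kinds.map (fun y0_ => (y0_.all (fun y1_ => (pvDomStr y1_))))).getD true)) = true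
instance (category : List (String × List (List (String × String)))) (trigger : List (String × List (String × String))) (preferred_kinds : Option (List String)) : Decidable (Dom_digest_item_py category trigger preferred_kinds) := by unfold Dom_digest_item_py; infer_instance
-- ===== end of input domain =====

-- B replaces A's staged passes (one digest scan per wanted id, then a kind pass, then the
-- head fallback) by a SINGLE pass over digest keeping the first item of minimal priority
-- rank (objective: alternative, same cost).

-- dict.get(k) on a Python dict passed in as an association list: first match wins
def pvAGet? {α : Type} (d : List (String × α)) (k : String) : Option α :=
  (d.find? (fun p => p.1 == k)).map (·.2)

-- ===== PORT A =====
-- 'for wanted in [w for w in wanted_ids if w]: for item in digest: if item.get("id") == wanted: return item'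
def aFindWanted (digest : List (List (String × String))) : List String → Option (List (String × String))
  | [] => none
  | w :: ws =>
    match digest.find? (fun item => pvAGet? item "id" == some w) with
    | some it => some it
    | none => aFindWanted digest ws

-- 'for item in digest: if item.get("kind") in preferred_kinds: return item'
def findPreferred (digest : List (List (String × String))) (ks : List String) : Option (List (String × String)) :=
  digest.find? (fun item =>
    match pvAGet? item "kind" with
    | some k => ks.contains k
    | none => false)

def digest_item_py (category : List (String × List (List (String × String)))) (trigger : List (String × List (String × String))) (preferred_kinds : Option (List String)) : List (String × String) :=
  let category := if category.isEmpty then [] else category   -- category = category or {}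
  let payload := (pvAGet? trigger "payload").getD []
  let wanted_ids : List (Option String) :=
    [pvAGet? payload "top_item_id", pvAGet? payload "digest_item_id",
     pvAGet? payload "alert_id", pvAGet? payload "item_id"]
  let digest := (pvAGet? category "digest").getD []
  match aFindWanted digest ((wanted_ids.filterMap id).filter (fun w => w != "")) with
  | some it => it
  | none =>
    match preferred_kinds with
    | some (k :: ks) =>
      match findPreferred digest (k :: ks) with
      | some it => it
      | none => digest.headD []
    | _ => digest.headD []

-- ===== PORT B =====
-- dict.get(k) first-match lookup, written as B's own structural recursion
def bGet? {α : Type} : List (String × α) → String → Option α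
  | [], _ => none
  | (k', v) :: rest, k => if k' == k then some v else bGet? rest k

-- 'next((j for j, w in enumerate(wanted) if iid == w), worst)' — the id rank
def bIdRank (iid : Option String) : List String → Nat → Option Nat
  | [], _ => none
  | w :: ws, j => if iid == some w then some j else bIdRank iid ws (j + 1)

-- 'item.get("kind") in preferred_kinds'
def bKindMatch (ks : List String) (item : List (String × String)) : Bool :=
  ((bGet? item "kind").map (fun k => ks.contains k)).getD false

-- the priority rank of one digest item
def bRank (wanted : List String) (pk : Option (List String)) (item : List (String × String)) : Nat :=
  match bIdRank (bGet? item "id") wanted 0 with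
  | some j => j
  | none =>
    match pk.getD [] with
    | [] => wanted.length + 1
    | k :: ks => if bKindMatch (k :: ks) item then wanted.length else wanted.length + 1

-- 'for item in digest: … if rank < best_rank: best_rank, best = rank, item; if rank == 0: break'
def bLoop (wanted : List String) (pk : Option (List String)) :
    List (List (String × String)) → Nat → List (String × String) → List (String × String)
  | [], _, best => best
  | item :: rest, bestRank, best =>
    let rank := bRank wanted pk item
    if rank < bestRank then
      if rank = 0 then item else bLoop wanted pk rest rank item
    else bLoop wanted pk rest bestRank best

def digest_item_py_alt (category : List (String × List (List (String × String)))) (trigger : List (String × List (String × String))) (preferred_kinds : Option (List String)) : List (String × String) :=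
  let category := if category.isEmpty then [] else category
  let payload := (bGet? trigger "payload").getD []
  let wanted : List String :=
    (([bGet? payload "top_item_id", bGet? payload "digest_item_id",
       bGet? payload "alert_id", bGet? payload "item_id"].filterMap id).filter (fun w => w != ""))
  let digest := (bGet? category "digest").getD []
  bLoop wanted preferred_kinds digest (wanted.length + 2) []

-- ===== PRECONDITION & SPEC =====
def Spec_digest_item_py (category : List (String × List (List (String × String)))) (trigger : List (String × List (String × String))) (preferred_kinds : Option (List String)) (out : List (String × String)) : Prop := out = digest_item_py_alt category trigger preferred_kinds
instance (category : List (String × List (List (String × String)))) (trigger : List (String × List (String × String))) (preferred_kinds : Option (List String)) (out : List (String × String)) : Decidable (Spec_digest_item_py category trigger preferred_kinds out) := by unfold Spec_digest_item_py; infer_instance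

-- ===== CLAIM (what is proved, stated in full; the proofs are below) =====
def Claim_equal_digest_item_py : Prop := ∀ (category : List (String × List (List (String × String)))) (trigger : List (String × List (String × String))) (preferred_kinds : Option (List String)), Dom_digest_item_py category trigger preferred_kinds → Spec_digest_item_py category trigger preferred_kinds (digest_item_py category trigger preferred_kinds)

-- ===== LEMMAS AND PROOFS =====

theorem pvAGet_eq_bGet : @pvAGet? = @bGet? := by
  funext α d k
  induction d with
  | nil => rfl
  | cons p rest ih =>
    obtain ⟨k', v⟩ := p
    by_cases h : (k' == k) = true
    · simp only [pvAGet?, bGet?, List.find?_cons, h, if_true]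
      rfl
    · simp only [pvAGet?, bGet?, List.find?_cons, h, Bool.false_eq_true, if_false]
      exact ih

-- first element of minimal rank (ties: earliest), the common specification
def argminFirst {α : Type} (r : α → Nat) : List α → Option α
  | [] => none
  | x :: xs =>
    match argminFirst r xs with
    | none => some x
    | some y => if r x ≤ r y then some x else some y

theorem argminFirst_eq_none {α : Type} (r : α → Nat) (l : List α) :
    argminFirst r l = none ↔ l = [] := by
  cases l with
  | nil => simp [argminFirst]
  | cons x xs =>
    simp only [argminFirst]
    cases argminFirst r xs with
    | none => simp
    | some y => by_cases h : r x ≤ r y <;> simp [h]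

theorem argminFirst_mem {α : Type} (r : α → Nat) (l : List α) :
    ∀ y, argminFirst r l = some y → y ∈ l := by
  induction l with
  | nil => intro y h; cases h
  | cons x xs ih =>
    intro y h
    simp only [argminFirst] at h
    cases hx : argminFirst r xs with
    | none => rw [hx] at h; simp at h; simp [h]
    | some z =>
      rw [hx] at h
      by_cases hle : r x ≤ r z
      · simp [hle] at h; simp [h]
      · simp [hle] at h; subst h; exact List.mem_cons_of_mem _ (ih z hx)

theorem argminFirst_min {α : Type} (r : α → Nat) (l : List α) :
    ∀ y, argminFirst r l = some y → ∀ x ∈ l, r y ≤ r x := by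
  induction l with
  | nil => intro y h; cases h
  | cons x xs ih =>
    intro y h z hz
    simp only [argminFirst] at h
    cases hx : argminFirst r xs with
    | none =>
      rw [hx] at h; simp at h; subst h
      rcases List.mem_cons.mp hz with hz | hz
      · subst hz; exact le_refl _
      · exact absurd ((argminFirst_eq_none r xs).mp hx ▸ hz) (by simp)
    | some w =>
      rw [hx] at h
      by_cases hle : r x ≤ r w
      · simp [hle] at h; subst h
        rcases List.mem_cons.mp hz with hz | hz
        · subst hz; exact le_refl _
        · exact le_trans hle (ih w hx z hz)
      · simp [hle] at h; subst h
        rcases List.mem_cons.mp hz with hz | hz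
        · subst hz; omega
        · exact ih _ hx z hz

theorem argminFirst_find {α : Type} (r : α → Nat) (l : List α) :
    ∀ y, argminFirst r l = some y → l.find? (fun x => r x == r y) = some y := by
  induction l with
  | nil => intro y h; cases h
  | cons x xs ih =>
    intro y h
    simp only [argminFirst] at h
    cases hx : argminFirst r xs with
    | none =>
      rw [hx] at h; simp at h; subst h
      rw [List.find?_cons_of_pos (by simp)]
    | some w =>
      rw [hx] at h
      by_cases hle : r x ≤ r w
      · simp [hle] at h; subst h
        rw [List.find?_cons_of_pos (by simp)]
      · simp [hle] at h; subst h
        have hyx := argminFirst_min r xs w hx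
        have hne : (r x == r w) = false := by
          simp only [beq_eq_false_iff_ne]; omega
        rw [List.find?_cons, hne]
        exact ih w hx

theorem argminFirst_congr {α : Type} (r r' : α → Nat) (l : List α)
    (h : ∀ x ∈ l, r x = r' x) : argminFirst r l = argminFirst r' l := by
  induction l with
  | nil => rfl
  | cons x xs ih =>
    simp only [argminFirst]
    rw [ih (fun z hz => h z (List.mem_cons_of_mem _ hz))]
    cases hw : argminFirst r' xs with
    | none => rfl
    | some w =>
      have hx := h x (List.mem_cons_self ..)
      have hww := h w (List.mem_cons_of_mem _ (argminFirst_mem r' xs w hw))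
      dsimp only
      rw [hx, hww]

theorem argminFirst_shift {α : Type} (r : α → Nat) (l : List α) :
    argminFirst (fun x => r x + 1) l = argminFirst r l := by
  induction l with
  | nil => rfl
  | cons x xs ih =>
    simp only [argminFirst, ih]
    cases argminFirst r xs with
    | none => rfl
    | some w => simp only [Nat.add_le_add_iff_right]

theorem find?_congr {α : Type} (p q : α → Bool) (l : List α)
    (h : ∀ x ∈ l, p x = q x) : l.find? p = l.find? q := by
  induction l with
  | nil => rfl
  | cons x xs ih =>
    rw [List.find?_cons, List.find?_cons, h x (List.mem_cons_self ..)]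
    cases q x
    · exact ih (fun z hz => h z (List.mem_cons_of_mem _ hz))
    · rfl

theorem bIdRank_lt (iid : Option String) (ws : List String) (c j : Nat)
    (h : bIdRank iid ws c = some j) : c ≤ j ∧ j < c + ws.length := by
  induction ws generalizing c with
  | nil => cases h
  | cons w ws ih =>
    simp only [bIdRank] at h
    by_cases hm : (iid == some w) = true
    · rw [if_pos hm] at h
      simp at h; subst h; simp
    · rw [if_neg hm] at h
      have := ih (c + 1) h
      simp only [List.length_cons]
      omega

theorem bIdRank_none (iid : Option String) (ws : List String) (c : Nat) :
    bIdRank iid ws c = none ↔ ∀ w ∈ ws, (iid == some w) = false := by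
  induction ws generalizing c with
  | nil => simp [bIdRank]
  | cons w ws ih =>
    simp only [bIdRank]
    by_cases hm : (iid == some w) = true
    · rw [if_pos hm]
      constructor
      · intro h; cases h
      · intro h
        have := h w (List.mem_cons_self ..)
        rw [hm] at this
        cases this
    · rw [if_neg hm, ih (c + 1)]
      constructor
      · intro h x hx
        rcases List.mem_cons.mp hx with hx | hx
        · subst hx; simpa using hm
        · exact h x hx
      · intro h x hx; exact h x (List.mem_cons_of_mem _ hx)

theorem bIdRank_succ (iid : Option String) (ws : List String) (c : Nat) :
    bIdRank iid ws (c + 1) = (bIdRank iid ws c).map (· + 1) := by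
  induction ws generalizing c with
  | nil => rfl
  | cons w ws ih =>
    simp only [bIdRank]
    by_cases hm : (iid == some w) = true
    · simp [hm]
    · simp only [if_neg hm]; exact ih (c + 1)

theorem bRank_spec (ws : List String) (pk : Option (List String)) (x : List (String × String)) :
    (∃ j, bIdRank (bGet? x "id") ws 0 = some j ∧ bRank ws pk x = j) ∨
    (bIdRank (bGet? x "id") ws 0 = none ∧ ws.length ≤ bRank ws pk x ∧ bRank ws pk x ≤ ws.length + 1) := by
  unfold bRank
  cases h : bIdRank (bGet? x "id") ws 0 with
  | some j => exact Or.inl ⟨j, rfl, rfl⟩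
  | none =>
    refine Or.inr ⟨rfl, ?_⟩
    rcases pk with _ | (_ | ⟨k, ks⟩)
    · simp
    · simp
    · simp only [Option.getD_some]
      split_ifs <;> omega

theorem bRank_le (wanted : List String) (pk : Option (List String)) (x : List (String × String)) :
    bRank wanted pk x ≤ wanted.length + 1 := by
  rcases bRank_spec wanted pk x with ⟨j, hj, hb⟩ | ⟨_, _, hle⟩
  · have := bIdRank_lt _ _ _ _ hj
    omega
  · exact hle

-- with no id match, a nonempty preferred_kinds separates kind matches (len) from the rest (len + 1)
theorem bRank_of_no_id (ws : List String) (k : String) (ks : List String)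
    (x : List (String × String)) (h : bIdRank (bGet? x "id") ws 0 = none) :
    bRank ws (some (k :: ks)) x =
      if bKindMatch (k :: ks) x then ws.length else ws.length + 1 := by
  unfold bRank; simp only [h, Option.getD_some]

-- with no id match and no usable preferred_kinds, the rank is the last-place rank
theorem bRank_of_no_id_nokinds (ws : List String) (pk : Option (List String))
    (x : List (String × String)) (h : bIdRank (bGet? x "id") ws 0 = none)
    (hpk : pk = none ∨ pk = some []) :
    bRank ws pk x = ws.length + 1 := by
  rcases hpk with rfl | rfl <;> (unfold bRank; simp only [h, Option.getD_none, Option.getD_some])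

-- B's single pass computes the first item of minimal rank (or the default)
theorem bLoop_eq (wanted : List String) (pk : Option (List String))
    (digest : List (List (String × String))) (R : Nat) (b : List (String × String)) :
    bLoop wanted pk digest R b =
      match argminFirst (bRank wanted pk) digest with
      | some y => if bRank wanted pk y < R then y else b
      | none => b := by
  induction digest generalizing R b with
  | nil => rfl
  | cons x xs ih =>
    cases hx : argminFirst (bRank wanted pk) xs with
    | none =>
      have hxs : xs = [] := (argminFirst_eq_none _ _).mp hx
      subst hxs
      simp only [bLoop, argminFirst]
      split_ifs <;> rfl
    | some y =>
      simp only [bLoop, argminFirst, ih, hx]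
      by_cases hle : bRank wanted pk x ≤ bRank wanted pk y
      · simp only [if_pos hle]
        by_cases h1 : bRank wanted pk x < R
        · simp only [if_pos h1]
          by_cases h0 : bRank wanted pk x = 0
          · simp only [if_pos h0]
          · simp only [if_neg h0,
              if_neg (by omega : ¬ bRank wanted pk y < bRank wanted pk x)]
        · simp only [if_neg h1,
            if_neg (by omega : ¬ bRank wanted pk y < R)]
      · simp only [if_neg hle]
        by_cases h1 : bRank wanted pk x < R
        · simp only [if_pos h1,
            if_neg (by omega : ¬ bRank wanted pk x = 0),
            if_pos (by omega : bRank wanted pk y < bRank wanted pk x),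
            if_pos (by omega : bRank wanted pk y < R)]
        · simp only [if_neg h1]

-- rank 0 is exactly "id matches the first wanted id"
theorem bRank_zero_iff (w : String) (ws : List String) (pk : Option (List String))
    (x : List (String × String)) :
    (bRank (w :: ws) pk x = 0) ↔ (bGet? x "id" == some w) = true := by
  constructor
  · intro h0
    by_contra hm
    simp only [Bool.not_eq_true] at hm
    rcases bRank_spec (w :: ws) pk x with ⟨j, hj, hb⟩ | ⟨_, hge, _⟩
    · rw [show bIdRank (bGet? x "id") (w :: ws) 0 = bIdRank (bGet? x "id") ws 1 by
        simp [bIdRank, hm]] at hj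
      have := bIdRank_lt _ _ _ _ hj
      omega
    · simp only [List.length_cons] at hge
      omega
  · intro hm
    have hid : bIdRank (bGet? x "id") (w :: ws) 0 = some 0 := by simp [bIdRank, hm]
    rcases bRank_spec (w :: ws) pk x with ⟨j, hj, hb⟩ | ⟨hn, _, _⟩
    · rw [hid] at hj
      injection hj with hj
      omega
    · rw [hid] at hn
      cases hn
-- when the head wanted id matches no item, every rank shifts down by exactly one
theorem bRank_shift (w : String) (ws : List String) (pk : Option (List String))
    (x : List (String × String)) (h : (bGet? x "id" == some w) = false) :
    bRank (w :: ws) pk x = bRank ws pk x + 1 := by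
  have hm : ¬ (bGet? x "id" == some w) = true := by simp [h]
  have hstep : bIdRank (bGet? x "id") (w :: ws) 0 = (bIdRank (bGet? x "id") ws 0).map (· + 1) := by
    simp only [bIdRank, if_neg hm]
    exact bIdRank_succ _ _ 0
  cases h0 : bIdRank (bGet? x "id") ws 0 with
  | some j =>
    have h1 : bIdRank (bGet? x "id") (w :: ws) 0 = some (j + 1) := by rw [hstep, h0]; rfl
    have ha : bRank (w :: ws) pk x = j + 1 := by unfold bRank; rw [h1]
    have hb : bRank ws pk x = j := by unfold bRank; rw [h0]
    omega
  | none =>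
    have h1 : bIdRank (bGet? x "id") (w :: ws) 0 = none := by rw [hstep, h0]; rfl
    rcases pk with _ | (_ | ⟨k, ks⟩)
    · have ha : bRank (w :: ws) none x = (w :: ws).length + 1 :=
        bRank_of_no_id_nokinds _ _ _ h1 (Or.inl rfl)
      have hb : bRank ws none x = ws.length + 1 :=
        bRank_of_no_id_nokinds _ _ _ h0 (Or.inl rfl)
      simp only [List.length_cons] at ha
      omega
    · have ha : bRank (w :: ws) (some []) x = (w :: ws).length + 1 :=
        bRank_of_no_id_nokinds _ _ _ h1 (Or.inr rfl)
      have hb : bRank ws (some []) x = ws.length + 1 :=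
        bRank_of_no_id_nokinds _ _ _ h0 (Or.inr rfl)
      simp only [List.length_cons] at ha
      omega
    · have ha := bRank_of_no_id (w :: ws) k ks x h1
      have hb := bRank_of_no_id ws k ks x h0
      simp only [List.length_cons] at ha
      split_ifs at ha hb <;> omega

-- A's wanted-id passes find exactly the first item of minimal rank, when that rank is an id rank
theorem aFindWanted_eq_argmin (ws : List String) (pk : Option (List String))
    (digest : List (List (String × String))) :
    ∀ y, argminFirst (bRank ws pk) digest = some y →
    bRank ws pk y < ws.length →
    aFindWanted digest ws = some y := by
  induction ws with
  | nil => intro y h hlt; simp at hlt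
  | cons w ws ih =>
    intro y h hlt
    rw [aFindWanted, pvAGet_eq_bGet]
    cases hf : digest.find? (fun item => bGet? item "id" == some w) with
    | some z =>
      have hzmem := List.mem_of_find?_eq_some hf
      have hz : (bGet? z "id" == some w) = true := by
        have := List.find?_some hf
        simpa using this
      have hz0 : bRank (w :: ws) pk z = 0 := (bRank_zero_iff w ws pk z).mpr hz
      have hy0 : bRank (w :: ws) pk y = 0 :=
        Nat.le_zero.mp (hz0 ▸ argminFirst_min _ _ y h z hzmem)
      have hfy : digest.find? (fun x => bRank (w :: ws) pk x == bRank (w :: ws) pk y) = some y :=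
        argminFirst_find _ _ y h
      rw [find?_congr _ (fun item => bGet? item "id" == some w) digest
        (by
          intro x _
          rw [hy0]
          by_cases hx : (bGet? x "id" == some w) = true
          · simp [hx, (bRank_zero_iff w ws pk x).mpr hx]
          · simp only [hx]
            have : ¬ bRank (w :: ws) pk x = 0 := fun hc => hx ((bRank_zero_iff w ws pk x).mp hc)
            simp [this])] at hfy
      rw [hf] at hfy
      exact hfy
    | none =>
      have hnm : ∀ x ∈ digest, (bGet? x "id" == some w) = false := by
        intro x hx
        have := List.find?_eq_none.mp hf x hx
        simpa using this
      have hshift : argminFirst (bRank ws pk) digest = some y := by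
        rw [← argminFirst_shift (bRank ws pk) digest,
          ← argminFirst_congr _ _ digest (fun x hx => bRank_shift w ws pk x (hnm x hx)), h]
      have hymem := argminFirst_mem _ _ y hshift
      have hy : bRank (w :: ws) pk y = bRank ws pk y + 1 := bRank_shift w ws pk y (hnm y hymem)
      exact ih y hshift (by simp only [List.length_cons] at hlt; omega)

-- when no item's id equals any wanted id, all of A's wanted-id passes come up empty
theorem aFindWanted_none (ws : List String)
    (digest : List (List (String × String)))
    (h : ∀ x ∈ digest, ∀ w ∈ ws, (bGet? x "id" == some w) = false) :
    aFindWanted digest ws = none := by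
  induction ws with
  | nil => rfl
  | cons w ws ih =>
    rw [aFindWanted, pvAGet_eq_bGet]
    have hf : digest.find? (fun item => bGet? item "id" == some w) = none :=
      List.find?_eq_none.mpr (fun x hx => by
        simp only [Bool.not_eq_true]
        exact h x hx w (List.mem_cons_self ..))
    rw [hf]
    exact ih (fun x hx v hv => h x hx v (List.mem_cons_of_mem _ hv))

-- large rank means no id match at all
theorem bRank_ge_no_id (ws : List String) (pk : Option (List String))
    (x : List (String × String)) (h : ws.length ≤ bRank ws pk x) :
    bIdRank (bGet? x "id") ws 0 = none := by
  rcases bRank_spec ws pk x with ⟨j, hj, hb⟩ | ⟨hn, _, _⟩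
  · have := bIdRank_lt _ _ _ _ hj
    omega
  · exact hn

-- the heart of the equivalence: A's staged passes equal B's single min-rank pass
theorem aMatch_eq_bLoop (ws : List String) (pk : Option (List String))
    (digest : List (List (String × String))) :
    (match aFindWanted digest ws with
     | some it => it
     | none =>
       match pk with
       | some (k :: ks) =>
         match findPreferred digest (k :: ks) with
         | some it => it
         | none => digest.headD []
       | _ => digest.headD []) = bLoop ws pk digest (ws.length + 2) [] := by
  rw [bLoop_eq]
  cases hmin : argminFirst (bRank ws pk) digest with
  | none =>
    have hnil : digest = [] := (argminFirst_eq_none _ _).mp hmin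
    subst hnil
    rw [aFindWanted_none ws [] (by simp)]
    rcases pk with _ | (_ | ⟨k, ks⟩) <;> rfl
  | some y =>
    dsimp only
    have hle := bRank_le ws pk y
    rw [if_pos (by omega : bRank ws pk y < ws.length + 2)]
    have hminle := argminFirst_min _ _ y hmin
    by_cases hlt : bRank ws pk y < ws.length
    · rw [aFindWanted_eq_argmin ws pk digest y hmin hlt]
    · have hge : ∀ x ∈ digest, ws.length ≤ bRank ws pk x := by
        intro x hx
        have := hminle x hx
        omega
      have hnoid : ∀ x ∈ digest, bIdRank (bGet? x "id") ws 0 = none :=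
        fun x hx => bRank_ge_no_id ws pk x (hge x hx)
      rw [aFindWanted_none ws digest (fun x hx => (bIdRank_none _ _ _).mp (hnoid x hx))]
      have hymem := argminFirst_mem _ _ y hmin
      have hdne : digest ≠ [] := by
        intro hc
        rw [hc] at hymem
        cases hymem
      have hfind := argminFirst_find _ _ y hmin
      rcases pk with _ | (_ | ⟨k, ks⟩)
      · -- preferred_kinds falsy: every rank is len + 1, so y is the head
        have hall : ∀ x ∈ digest, bRank ws none x = ws.length + 1 :=
          fun x hx => bRank_of_no_id_nokinds ws none x (hnoid x hx) (Or.inl rfl)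
        cases digest with
        | nil => exact absurd rfl hdne
        | cons d ds =>
          rw [List.find?_cons_of_pos (by
            rw [hall d (List.mem_cons_self ..), hall y hymem]
            simp)] at hfind
          exact Option.some.inj hfind
      · have hall : ∀ x ∈ digest, bRank ws (some []) x = ws.length + 1 :=
          fun x hx => bRank_of_no_id_nokinds ws (some []) x (hnoid x hx) (Or.inr rfl)
        cases digest with
        | nil => exact absurd rfl hdne
        | cons d ds =>
          rw [List.find?_cons_of_pos (by
            rw [hall d (List.mem_cons_self ..), hall y hymem]
            simp)] at hfind
          exact Option.some.inj hfind
      · dsimp only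
        unfold findPreferred
        rw [pvAGet_eq_bGet]
        by_cases hky : bKindMatch (k :: ks) y = true
        · -- y is the first kind match
          have hry : bRank ws (some (k :: ks)) y = ws.length := by
            rw [bRank_of_no_id ws k ks y (hnoid y hymem), if_pos hky]
          rw [find?_congr _ (fun item => bKindMatch (k :: ks) item) digest (by
            intro x hx
            rw [hry, bRank_of_no_id ws k ks x (hnoid x hx)]
            by_cases hkx : bKindMatch (k :: ks) x = true
            · simp [hkx]
            · simp only [Bool.not_eq_true] at hkx
              simp [hkx])] at hfind
          rw [show (fun item => bKindMatch (k :: ks) item) =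
              (fun item => match bGet? item "kind" with
                | some kk => (k :: ks).contains kk
                | none => false) from funext (fun item => by unfold bKindMatch; cases bGet? item "kind" <;> rfl)] at hfind
          rw [hfind]
        · -- no kind match anywhere: all ranks are len + 1, y is the head
          simp only [Bool.not_eq_true] at hky
          have hnk : ∀ x ∈ digest, bKindMatch (k :: ks) x = false := by
            intro x hx
            by_contra hc
            simp only [Bool.not_eq_false] at hc
            have hrx : bRank ws (some (k :: ks)) x = ws.length := by
              rw [bRank_of_no_id ws k ks x (hnoid x hx), if_pos hc]
            have hry : bRank ws (some (k :: ks)) y = ws.length + 1 := by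
              rw [bRank_of_no_id ws k ks y (hnoid y hymem), hky]
              rfl
            have := hminle x hx
            omega
          have hfp : digest.find? (fun item => match bGet? item "kind" with
              | some kk => (k :: ks).contains kk
              | none => false) = none :=
            by
              rw [show (fun item => match bGet? item "kind" with
                  | some kk => (k :: ks).contains kk
                  | none => false) = (fun item => bKindMatch (k :: ks) item) from
                funext (fun item => by unfold bKindMatch; cases bGet? item "kind" <;> rfl)]
              exact List.find?_eq_none.mpr (fun x hx => by simp [hnk x hx])
          rw [hfp]
          have hall : ∀ x ∈ digest, bRank ws (some (k :: ks)) x = ws.length + 1 := by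
            intro x hx
            rw [bRank_of_no_id ws k ks x (hnoid x hx), hnk x hx]
            rfl
          cases digest with
          | nil => exact absurd rfl hdne
          | cons d ds =>
            rw [List.find?_cons_of_pos (by
              rw [hall d (List.mem_cons_self ..), hall y hymem]
              simp)] at hfind
            exact Option.some.inj hfind

-- ===== VERDICT (by name: the statement is the Claim_ definition above) =====
theorem digest_item_py_spec : Claim_equal_digest_item_py := by
  intro category trigger preferred_kinds _
  unfold Spec_digest_item_py digest_item_py digest_item_py_alt
  rw [pvAGet_eq_bGet]
  exact aMatch_eq_bLoop _ preferred_kinds _
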